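-- pv_equiv track=rewrite | github.com/shinwonse/coding-test | 프로그래머스/lv2/17680. ［1차］ 캐시/［1차］ 캐시.py | solution
-- ===== SOURCE A (Python) =====
-- def solution(cacheSize, cities):
--     cache = []
--     time = 0
--
--     for city in cities:
--         city = city.lower()
--         if cacheSize == 0:
--             time += len(cities) * 5
--             return time
--
--         if len(cache) < cacheSize and city not in cache:
--             time += 5
--             cache.append(city)
--             continue
--
--         if city in cache:
--             time += 1
--             index = cache.index(city)
--             cache.append(cache.pop(index))
--         else:
--             time += 5
--             cache.pop(0)
--             cache.append(city)
--
--     return time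
-- ===== SOURCE B (Python) =====
-- def solution(cacheSize, cities):
--     # No cache simulation: an LRU cache of size k holds the k most recently
--     # used distinct cities, so an access hits iff the city occurred before and
--     # fewer than k distinct cities occur strictly after its last occurrence.
--     history = []
--     last = {}
--     time = 0
--     for city in cities:
--         city = city.lower()
--         j = last.get(city)
--         if j is not None and len(set(history[j + 1:])) < cacheSize:
--             time += 1
--         else:
--             time += 5
--         last[city] = len(history)
--         history.append(city)
--     return time
-- ===== Notes on version B (the rewrite author's own statement) =====
-- stated objective: faster
-- what changed: B keeps no LRU cache at all: it records each city's last-occurrence index in a dict and classifies every access by its reuse distance (hit iff the number of distinct cities after the previous occurrence is below cacheSize), instead of simulating the cache list with per-access membership/index/pop scans.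
import Mathlib
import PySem

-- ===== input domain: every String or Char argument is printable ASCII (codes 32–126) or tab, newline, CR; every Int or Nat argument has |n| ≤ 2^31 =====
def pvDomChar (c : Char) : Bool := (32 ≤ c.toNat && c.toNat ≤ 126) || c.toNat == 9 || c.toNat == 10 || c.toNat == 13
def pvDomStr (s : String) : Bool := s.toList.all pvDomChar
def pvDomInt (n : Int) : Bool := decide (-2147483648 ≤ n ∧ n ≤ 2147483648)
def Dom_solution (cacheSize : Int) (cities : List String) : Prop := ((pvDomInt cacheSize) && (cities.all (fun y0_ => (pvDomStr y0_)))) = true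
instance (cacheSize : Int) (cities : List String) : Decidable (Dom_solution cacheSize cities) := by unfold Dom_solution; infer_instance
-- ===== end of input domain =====

-- B drops A's stateful LRU-cache simulation entirely: each access is classified by its
-- reuse distance (hit iff fewer than cacheSize distinct other cities were accessed since
-- the previous access to the same city) — a different algorithm of similar cost.

-- ===== PORT A =====
-- loop of A: state = (remaining cities, cache list, time); early return when cacheSize == 0.
-- cache.pop(cache.index(city)) + append = erase first occurrence + append (List.erase erases
-- the first occurrence, exactly Python's pop at .index); cache.pop(0) + append = tail ++ [city]
-- (pop(0) on an empty cache raises IndexError in Python — those inputs are outside Pre_solution).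
def solutionGo (cacheSize total : Int) : List String → List String → Int → Int
  | [], _, time => time
  | c :: rest, cache, time =>
    let city := PySem.Str.lower c
    if cacheSize = 0 then time + total * 5
    else if (cache.length : Int) < cacheSize ∧ city ∉ cache then
      solutionGo cacheSize total rest (cache ++ [city]) (time + 5)
    else if city ∈ cache then
      solutionGo cacheSize total rest (cache.erase city ++ [city]) (time + 1)
    else
      solutionGo cacheSize total rest (cache.tail ++ [city]) (time + 5)

def solution (cacheSize : Int) (cities : List String) : Int :=
  solutionGo cacheSize (cities.length : Int) cities [] 0

-- ===== PORT B =====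
-- j = last.get(city); hit iff j is not None and len(set(history[j+1:])) < cacheSize
def bHit (last : PySem.Dict String Int) (history : List String) (city : String)
    (cacheSize : Int) : Bool :=
  match PySem.Dict.get? last city with
  | none => false
  | some j =>
      decide (((PySem.Set.ofList (PySem.List.slice history (some (j + 1)) none)).length : Int)
        < cacheSize)

-- main loop of B: state = (remaining cities, last-occurrence dict, lowered history, time).
def solutionAltGo (cacheSize : Int) :
    List String → PySem.Dict String Int → List String → Int → Int
  | [], _, _, time => time
  | c :: rest, last, history, time =>
    let city := PySem.Str.lower c
    solutionAltGo cacheSize rest (last.insert city (history.length : Int)) (history ++ [city])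
      (time + if bHit last history city cacheSize then 1 else 5)

def solution_alt (cacheSize : Int) (cities : List String) : Int :=
  solutionAltGo cacheSize cities PySem.Dict.empty [] 0

-- ===== PRECONDITION & SPEC =====
-- Pre_ excludes exactly the inputs where A raises: a negative cacheSize with a nonempty
-- cities makes A's first miss do cache.pop(0) on an empty list (IndexError).
def Pre_solution (cacheSize : Int) (cities : List String) : Prop :=
  0 ≤ cacheSize ∨ cities = []
instance (cacheSize : Int) (cities : List String) : Decidable (Pre_solution cacheSize cities) := by
  unfold Pre_solution; infer_instance

def pvWitness_solution : Int × List String := (2, ["Jeju", "Pangyo", "jeju", "NewYork"])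

def Spec_solution (cacheSize : Int) (cities : List String) (out : Int) : Prop := out = solution_alt cacheSize cities
instance (cacheSize : Int) (cities : List String) (out : Int) : Decidable (Spec_solution cacheSize cities out) := by unfold Spec_solution; infer_instance

-- ===== CLAIM (what is proved, stated in full; the proofs are below) =====
def Claim_equal_solution : Prop := ∀ (cacheSize : Int) (cities : List String), Dom_solution cacheSize cities → Pre_solution cacheSize cities → Spec_solution cacheSize cities (solution cacheSize cities)

-- ===== LEMMAS AND PROOFS =====

-- the recency list of a reversed history: distinct elements, most recent first
def recency : List String → List String
  | [] => []
  | x :: p => x :: (recency p).filter (fun a => a ≠ x)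

-- the last-occurrence dict of B, characterised: each stored index splits the history
-- at the city's last occurrence
def LastInv (last : PySem.Dict String Int) (history : List String) : Prop :=
  ∀ c : String,
    (PySem.Dict.get? last c = none ∧ c ∉ history) ∨
    (∃ pre suf : List String, PySem.Dict.get? last c = some ((pre.length : Int)) ∧
      history = pre ++ c :: suf ∧ c ∉ suf)

lemma lastInv_empty : LastInv PySem.Dict.empty [] := by
  intro c
  exact Or.inl ⟨rfl, by simp⟩

lemma lastInv_step (last : PySem.Dict String Int) (history : List String) (city : String)
    (h : LastInv last history) :
    LastInv (last.insert city (history.length : Int)) (history ++ [city]) := by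
  intro c
  by_cases hc : c = city
  · subst hc
    refine Or.inr ⟨history, [], ?_, by simp, by simp⟩
    rw [PySem.Dict.get?_insert_self]
  · rcases h c with ⟨h1, h2⟩ | ⟨pre, suf, h1, h2, h3⟩
    · refine Or.inl ⟨?_, ?_⟩
      · rw [PySem.Dict.get?_insert_of_ne _ _ hc, h1]
      · simp [h2, hc]
    · refine Or.inr ⟨pre, suf ++ [city], ?_, ?_, ?_⟩
      · rw [PySem.Dict.get?_insert_of_ne _ _ hc, h1]
      · rw [h2]; simp
      · simp [h3, hc]

lemma mem_take_append_cons (c : String) :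
    ∀ (A Z : List String) (kn : Nat), c ∉ A →
      (c ∈ (A ++ c :: Z).take kn ↔ A.length < kn) := by
  intro A
  induction A with
  | nil =>
    intro Z kn _
    cases kn with
    | zero => simp
    | succ m => simp
  | cons a A' ih =>
    intro Z kn hc
    have hca : c ≠ a := fun h => hc (by simp [h])
    cases kn with
    | zero => simp
    | succ m =>
      simp only [List.cons_append, List.take_succ_cons, List.mem_cons, List.length_cons]
      rw [ih Z m (fun h => hc (List.mem_cons_of_mem _ h))]
      constructor
      · rintro (h | h)
        · exact absurd h hca
        · omega
      · intro h; right; omega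

lemma mem_recency (c : String) : ∀ (p : List String), c ∈ recency p ↔ c ∈ p := by
  intro p
  induction p with
  | nil => simp [recency]
  | cons x p' ih =>
    simp only [recency, List.mem_cons, List.mem_filter, ih]
    constructor
    · rintro (h | ⟨h, _⟩)
      · exact Or.inl h
      · exact Or.inr h
    · rintro (h | h)
      · exact Or.inl h
      · by_cases hcx : c = x
        · exact Or.inl hcx
        · exact Or.inr ⟨h, by simpa using hcx⟩

lemma nodup_recency : ∀ (p : List String), (recency p).Nodup := by
  intro p
  induction p with
  | nil => simp [recency]
  | cons x p' ih =>
    rw [recency]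
    refine List.nodup_cons.mpr ⟨?_, ih.filter _⟩
    intro h
    have := (List.mem_filter.mp h).2
    simp at this

-- the hit test, characterised: hit ⟺ city among the kn most recent distinct accesses
lemma recency_split (city : String) :
    ∀ (tw rest : List String), city ∉ tw →
      ∃ Z, recency (tw ++ city :: rest) = recency tw ++ city :: Z := by
  intro tw
  induction tw with
  | nil =>
    intro rest _
    exact ⟨(recency rest).filter (fun a => a ≠ city), rfl⟩
  | cons x tw' ih =>
    intro rest hc
    have hcx : city ≠ x := fun h => hc (by simp [h])
    obtain ⟨Z, hZ⟩ := ih rest (fun h => hc (List.mem_cons_of_mem _ h))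
    refine ⟨Z.filter (fun a => a ≠ x), ?_⟩
    show x :: (recency (tw' ++ city :: rest)).filter (fun a => a ≠ x) = _
    rw [hZ, List.filter_append, List.filter_cons]
    have hct : decide (city ≠ x) = true := by simpa using hcx
    rw [hct]
    rfl

lemma distinct_count (l : List String) :
    (PySem.Set.ofList l).length = (recency l.reverse).length := by
  have h1 : (PySem.Set.ofList l).Nodup := PySem.Set.nodup_ofList l
  have h2 : (recency l.reverse).Nodup := nodup_recency l.reverse
  have hmem : ∀ c : String, c ∈ PySem.Set.ofList l ↔ c ∈ recency l.reverse := by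
    intro c
    rw [PySem.Set.mem_ofList, mem_recency, List.mem_reverse]
  rw [← List.toFinset_card_of_nodup h1, ← List.toFinset_card_of_nodup h2]
  congr 1
  ext c
  simp only [List.mem_toFinset]
  exact hmem c

lemma bHit_iff (last : PySem.Dict String Int) (history : List String) (city : String)
    (kn : Nat) (hinv : LastInv last history) :
    bHit last history city (kn : Int)
      = decide (city ∈ (recency history.reverse).take kn) := by
  rcases hinv city with ⟨h1, h2⟩ | ⟨pre, suf, h1, h2, h3⟩
  · rw [bHit, h1]
    dsimp only
    have : city ∉ (recency history.reverse).take kn := by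
      intro h
      exact h2 (by
        have := (mem_recency city history.reverse).mp (List.mem_of_mem_take h)
        rwa [List.mem_reverse] at this)
    simp [this]
  · rw [bHit, h1]
    dsimp only
    have hslice : PySem.List.slice history (some ((pre.length : Int) + 1)) none = suf := by
      have hcast : ((pre.length : Int) + 1) = (((pre.length + 1 : Nat)) : Int) := by push_cast; ring
      rw [hcast, PySem.List.slice_from_natCast, h2]
      have : pre ++ city :: suf = (pre ++ [city]) ++ suf := by simp
      rw [this]
      have hlen : pre.length + 1 = (pre ++ [city]).length := by simp
      rw [hlen, List.drop_left]
    rw [hslice]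
    have hrev : history.reverse = suf.reverse ++ city :: pre.reverse := by
      rw [h2]; simp
    have hcs : city ∉ suf.reverse := by simpa using h3
    obtain ⟨Z, hZ⟩ := recency_split city suf.reverse pre.reverse hcs
    have hcnr : city ∉ recency suf.reverse := fun h => hcs ((mem_recency _ _).mp h)
    have hmtk := mem_take_append_cons city (recency suf.reverse) Z kn hcnr
    rw [hrev, hZ]
    rw [decide_eq_decide, hmtk, ← distinct_count]
    omega

-- the "cache full / not full" bookkeeping: filters and takes of the recency list
lemma take_filter_of_mem (c : String) :
    ∀ (R : List String) (m : Nat), R.Nodup → c ∈ R.take (m + 1) →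
      (R.take (m + 1)).filter (fun a => a ≠ c) = (R.filter (fun a => a ≠ c)).take m := by
  intro R
  induction R with
  | nil => intro m _ h; simp at h
  | cons x R' ih =>
    intro m hnd hc
    by_cases hx : x = c
    · subst hx
      have hxR : x ∉ R' := (List.nodup_cons.mp hnd).1
      rw [List.take_succ_cons, List.filter_cons]
      have h1 : decide (x ≠ x) = false := by simp
      rw [h1, List.filter_cons, h1]
      simp only [Bool.false_eq_true, if_false]
      have h2 : (R'.take m).filter (fun a => a ≠ x) = R'.take m :=
        List.filter_eq_self.mpr (fun a ha => by
          simp only [decide_eq_true_eq]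
          intro h; subst h; exact hxR (List.mem_of_mem_take ha))
      have h3 : R'.filter (fun a => a ≠ x) = R' :=
        List.filter_eq_self.mpr (fun a ha => by
          simp only [decide_eq_true_eq]
          intro h; subst h; exact hxR ha)
      rw [h2, h3]
    · have hcR : c ∈ R'.take m := by
        rcases List.mem_cons.mp (by simpa using hc) with h | h
        · exact absurd h.symm hx
        · exact h
      have hm : ∃ m', m = m' + 1 := by
        cases m with
        | zero => simp at hcR
        | succ m' => exact ⟨m', rfl⟩
      obtain ⟨m', rfl⟩ := hm
      have hx' : decide (x ≠ c) = true := by simpa using hx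
      rw [List.take_succ_cons, List.filter_cons, hx', List.filter_cons, hx']
      simp only [if_true, List.take_succ_cons]
      rw [ih m' (List.nodup_cons.mp hnd).2 hcR]

lemma take_filter_of_not_mem (c : String) :
    ∀ (R : List String) (n m : Nat), c ∉ R.take n → m < n →
      R.take m = (R.filter (fun a => a ≠ c)).take m := by
  intro R
  induction R with
  | nil => intro n m _ _; simp
  | cons x R' ih =>
    intro n m hc hmn
    have hn : ∃ n', n = n' + 1 := by
      cases n with
      | zero => omega
      | succ n' => exact ⟨n', rfl⟩
    obtain ⟨n', rfl⟩ := hn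
    rw [List.take_succ_cons] at hc
    have hx : x ≠ c := fun h => hc (by simp [h])
    have hc' : c ∉ R'.take n' := fun h => hc (List.mem_cons_of_mem _ h)
    have hx' : decide (x ≠ c) = true := by simpa using hx
    cases m with
    | zero => simp
    | succ m' =>
      rw [List.take_succ_cons, List.filter_cons, hx']
      simp only [if_true, List.take_succ_cons]
      rw [ih n' m' hc' (by omega)]

-- the key invariant step: A's cache after processing (reversed) history p is
-- ((recency p).take kn).reverse; each branch of A's loop preserves it.
lemma go_eq (kn : Nat) (hk : 1 ≤ kn) (total : Int) :
    ∀ (cs hist : List String) (last : PySem.Dict String Int) (time : Int),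
      LastInv last hist →
      solutionGo (kn : Int) total cs (((recency hist.reverse).take kn).reverse) time
        = solutionAltGo (kn : Int) cs last hist time := by
  intro cs
  induction cs with
  | nil => intro hist last time _; rfl
  | cons c rest ih =>
    intro hist last time hinv
    rw [solutionGo, solutionAltGo]
    have hk0 : ¬ ((kn : Int) = 0) := by omega
    rw [if_neg hk0]
    set city := PySem.Str.lower c with hcity
    set p := hist.reverse with hp
    set R := recency p with hR
    obtain ⟨m, hm⟩ : ∃ m, kn = m + 1 := ⟨kn - 1, by omega⟩
    subst hm
    have hrev : (hist ++ [city]).reverse = city :: p := by simp [hp]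
    have hrec : recency (city :: p) = city :: R.filter (fun a => a ≠ city) := rfl
    have hinv' : LastInv (last.insert city ((hist.length : Nat) : Int)) (hist ++ [city]) :=
      lastInv_step last hist city hinv
    have hhit : bHit last hist city ((m + 1 : Nat) : Int) = decide (city ∈ R.take (m + 1)) := by
      rw [bHit_iff last hist city (m + 1) hinv, ← hp, hR]
    have hmemc : (city ∈ (R.take (m + 1)).reverse) ↔ city ∈ R.take (m + 1) := List.mem_reverse
    -- target cache after the step:
    have hndR : R.Nodup := by rw [hR]; exact nodup_recency p
    have htarget : ((recency (hist ++ [city]).reverse).take (m + 1)).reverse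
        = ((R.filter (fun a => a ≠ city)).take m).reverse ++ [city] := by
      rw [hrev, hrec, List.take_succ_cons, List.reverse_cons]
    by_cases hroom : ((R.take (m + 1)).reverse.length : Int) < ((m + 1 : Nat) : Int) ∧ city ∉ (R.take (m + 1)).reverse
    · -- branch 1: room and miss
      rw [if_pos hroom]
      have hlen : R.length < (m + 1) := by
        have := hroom.1
        simp at this
        omega
      have htakeR : R.take (m + 1) = R := List.take_of_length_le (by omega)
      have hcR : city ∉ R := by
        have := hroom.2
        rw [hmemc, htakeR] at this
        exact this
      have hfil : R.filter (fun a => a ≠ city) = R :=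
        List.filter_eq_self.mpr (fun a ha => by
          simp only [decide_eq_true_eq]
          intro h; subst h; exact hcR ha)
      have htakem : R.take m = R := List.take_of_length_le (by omega)
      have hc1 : (R.take (m + 1)).reverse ++ [city]
          = ((recency (hist ++ [city]).reverse).take (m + 1)).reverse := by
        rw [htarget, hfil, htakem, htakeR]
      rw [hc1, ih _ _ _ hinv']
      have : bHit last hist city ((m + 1 : Nat) : Int) = false := by
        rw [hhit]
        simp only [decide_eq_false_iff_not]
        rw [htakeR]; exact hcR
      rw [this]
      simp
    · rw [if_neg hroom]
      by_cases hin : city ∈ (R.take (m + 1)).reverse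
      · -- branch 2: hit
        rw [if_pos hin]
        have hcR : city ∈ R.take (m + 1) := hmemc.mp hin
        have hndtake : (R.take (m + 1)).reverse.Nodup :=
          List.nodup_reverse.mpr (hndR.sublist (List.take_sublist _ _))
        have herase : (R.take (m + 1)).reverse.erase city
            = ((R.filter (fun a => a ≠ city)).take m).reverse := by
          rw [List.Nodup.erase_eq_filter hndtake]
          have hpred : (fun x => x != city) = (fun a => decide (a ≠ city)) := by
            funext a; by_cases h : a = city <;> simp [h, bne]
          rw [hpred, List.filter_reverse]
          congr 1
          exact take_filter_of_mem city R m hndR hcR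
        have hc2 : (R.take (m + 1)).reverse.erase city ++ [city]
            = ((recency (hist ++ [city]).reverse).take (m + 1)).reverse := by
          rw [htarget, herase]
        rw [hc2, ih _ _ _ hinv']
        have : bHit last hist city ((m + 1 : Nat) : Int) = true := by
          rw [hhit]; simpa using hcR
        rw [this]
        simp
      · -- branch 3: full and miss
        rw [if_neg hin]
        have hlenge : (m + 1) ≤ R.length := by
          have h1 : ¬ (((R.take (m + 1)).reverse.length : Int) < ((m + 1 : Nat) : Int)) := by
            intro h; exact hroom ⟨h, hin⟩
          simp at h1
          omega
        have hcR : city ∉ R.take (m + 1) := fun h => hin (hmemc.mpr h)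
        -- tail of the cache: drop the least recent (= last of take (m+1) R)
        have htail : (R.take (m + 1)).reverse.tail = (R.take m).reverse := by
          have hdl : (R.take (m + 1)).dropLast = R.take m := by
            rw [List.dropLast_eq_take, List.length_take, List.take_take]
            congr 1
            omega
          simp [hdl]
        have hc3 : (R.take (m + 1)).reverse.tail ++ [city]
            = ((recency (hist ++ [city]).reverse).take (m + 1)).reverse := by
          rw [htarget, htail,
              take_filter_of_not_mem city R (m + 1) m hcR (by omega)]
        rw [hc3, ih _ _ _ hinv']
        have : bHit last hist city ((m + 1 : Nat) : Int) = false := by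
          rw [hhit]
          simpa using hcR
        rw [this]
        simp

-- cacheSize ≤ 0: B's hit test never reports a hit
lemma bHit_nonpos (last : PySem.Dict String Int) (history : List String) (city : String)
    (k : Int) (hk : k ≤ 0) : bHit last history city k = false := by
  rw [bHit]
  cases PySem.Dict.get? last city with
  | none => rfl
  | some j =>
    simp only [decide_eq_false_iff_not, not_lt]
    have : (0 : Int) ≤ ((PySem.Set.ofList (PySem.List.slice history (some (j + 1)) none)).length : Int) :=
      Int.natCast_nonneg _
    omega

lemma altGo_nonpos (k : Int) (hk : k ≤ 0) :
    ∀ (cs : List String) (last : PySem.Dict String Int) (hist : List String) (time : Int),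
      solutionAltGo k cs last hist time = time + 5 * (cs.length : Int) := by
  intro cs
  induction cs with
  | nil => intro last hist time; simp [solutionAltGo]
  | cons c rest ih =>
    intro last hist time
    rw [solutionAltGo]
    rw [bHit_nonpos _ _ _ k hk, ih]
    simp only [List.length_cons]
    push_cast
    ring

-- ===== VERDICT (by name: the statement is the Claim_ definition above) =====
theorem solution_spec : Claim_equal_solution := by
  intro cacheSize cities _ hpre
  unfold Spec_solution solution solution_alt
  rcases cities with _ | ⟨c, rest⟩
  · rfl
  · have hpre' : 0 ≤ cacheSize := by
      rcases hpre with h | h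
      · exact h
      · simp at h
    by_cases h0 : cacheSize = 0
    · subst h0
      rw [solutionGo, if_pos rfl, altGo_nonpos 0 le_rfl]
      simp [mul_comm]
    · obtain ⟨kn, hkn⟩ : ∃ kn : Nat, cacheSize = (kn : Int) :=
        ⟨cacheSize.toNat, by omega⟩
      have hk1 : 1 ≤ kn := by omega
      subst hkn
      have := go_eq kn hk1 ((c :: rest).length : Int) (c :: rest) [] PySem.Dict.empty 0 lastInv_empty
      simpa [recency] using this
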